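-- pv_equiv track=rewrite | github.com/massimo-nocentini/oeis-tools | src/oeis.py | merge_splitted_text
-- ===== SOURCE A (Python) =====
-- def merge_splitted_text(lst):
--     """
--     Returns a new list where each splitted text in `lst` is joined into a single line of text.
--     """
--
--     merged = []
--
--     i = 0
--     while i < len(lst):
--
--         if '(Start)' in lst[i] or '(start)' in lst[i]:
--             j = i+1
--             while j < len(lst) and not ('(End)' in lst[j] or '(end)' in lst[j]): j += 1
--             joiner = "\n       - "
--             #joiner = "\n<br>"
--             merged.append(joiner.join(lst[i:j if j >= len(lst) or lst[j] == '(End)' else j+1])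
--                           .replace('(Start)', '').replace('(start)', '')
--                           .replace('(End)', '').replace('(end)', ''))
--             i = j+1
--         else:
--             merged.append(lst[i])
--             i += 1
--
--     return merged
-- ===== SOURCE B (Python) =====
-- def merge_splitted_text(lst):
--     """
--     Returns a new list where each splitted text in `lst` is joined into a single line of text.
--     """
--
--     def flush(buf):
--         return ("\n       - ".join(buf)
--                 .replace('(Start)', '').replace('(start)', '')
--                 .replace('(End)', '').replace('(end)', ''))
--
--     merged = []
--     buf = None  # None = outside a region; a list = the region collected so far
--
--     for elem in lst:
--         if buf is None:
--             if '(Start)' in elem or '(start)' in elem: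
--                 buf = [elem]
--             else:
--                 merged.append(elem)
--         elif elem == '(End)':
--             merged.append(flush(buf))
--             buf = None
--         elif '(End)' in elem or '(end)' in elem:
--             buf.append(elem)
--             merged.append(flush(buf))
--             buf = None
--         else:
--             buf.append(elem)
--
--     if buf is not None:
--         merged.append(flush(buf))
--
--     return merged
-- ===== Notes on version B (the rewrite author's own statement) =====
-- stated objective: simpler
-- what changed: Replaces the index-based outer while with an inner look-ahead scan plus slicing by a single linear pass that maintains an 'open region' buffer (None outside a region) and flushes it on a closing element or at end of list.
import Mathlib
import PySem

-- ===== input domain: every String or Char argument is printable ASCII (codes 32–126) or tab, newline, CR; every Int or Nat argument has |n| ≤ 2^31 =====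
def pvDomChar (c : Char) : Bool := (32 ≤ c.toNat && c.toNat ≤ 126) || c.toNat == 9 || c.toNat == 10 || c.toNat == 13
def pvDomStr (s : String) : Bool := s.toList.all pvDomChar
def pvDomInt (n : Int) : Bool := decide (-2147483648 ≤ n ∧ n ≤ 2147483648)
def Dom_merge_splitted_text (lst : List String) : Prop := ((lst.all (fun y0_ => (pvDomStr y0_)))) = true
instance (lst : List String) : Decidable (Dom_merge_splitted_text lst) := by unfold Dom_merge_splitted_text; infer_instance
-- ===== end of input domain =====

-- B replaces A's index-based while with look-ahead scan by a single pass keeping an open-region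
-- buffer; same output (objective: simpler decomposition, no speed claim).

-- ===== PORT A =====
-- inner while: first index j ≥ start with '(End)'/'(end)' in lst[j], else lst.length
def pvScanA (lst : List String) (j : Nat) : Nat :=
  if h : j < lst.length then
    if PySem.Str.isIn "(End)" lst[j] || PySem.Str.isIn "(end)" lst[j] then j
    else pvScanA lst (j+1)
  else j
termination_by lst.length - j
decreasing_by omega

theorem pvScanA_ge (lst : List String) (j : Nat) : j ≤ pvScanA lst j := by
  unfold pvScanA
  split
  · split
    · exact le_refl j
    · exact le_trans (by omega) (pvScanA_ge lst (j+1))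
  · exact le_refl j
termination_by lst.length - j
decreasing_by omega

-- A's upper slice bound 'j if j >= len(lst) or lst[j] == \'(End)\' else j+1'
def pvEndIdx (lst : List String) (j : Nat) : Nat :=
  if decide (lst.length ≤ j) || (lst[j]? == some "(End)") then j else j+1

def pvGoA (lst : List String) (i : Nat) : List String :=
  if h : i < lst.length then
    if PySem.Str.isIn "(Start)" lst[i] || PySem.Str.isIn "(start)" lst[i] then
      ((((PySem.Str.join "\n       - "
            (PySem.List.slice lst (some (i : Int))
              (some ((pvEndIdx lst (pvScanA lst (i+1)) : Nat) : Int)))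
          ).replace "(Start)" "").replace "(start)" "").replace "(End)" "").replace "(end)" ""
        :: pvGoA lst (pvScanA lst (i+1) + 1)
    else lst[i] :: pvGoA lst (i+1)
  else []
termination_by lst.length - i
decreasing_by
  · have := pvScanA_ge lst (i+1); omega
  · omega

def merge_splitted_text (lst : List String) : List String := pvGoA lst 0

-- ===== PORT B =====
def pvFlushB (buf : List String) : String :=
  ((((PySem.Str.join "\n       - " buf).replace "(Start)" "").replace "(start)" "").replace
      "(End)" "").replace "(end)" ""

def pvStepB (st : Option (List String) × List String) (elem : String) :
    Option (List String) × List String :=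
  match st with
  | (none, merged) =>
      if PySem.Str.isIn "(Start)" elem || PySem.Str.isIn "(start)" elem then
        (some [elem], merged)
      else (none, merged ++ [elem])
  | (some buf, merged) =>
      if elem == "(End)" then (none, merged ++ [pvFlushB buf])
      else if PySem.Str.isIn "(End)" elem || PySem.Str.isIn "(end)" elem then
        (none, merged ++ [pvFlushB (buf ++ [elem])])
      else (some (buf ++ [elem]), merged)

def merge_splitted_text_alt (lst : List String) : List String :=
  match lst.foldl pvStepB (none, []) with
  | (none, merged) => merged
  | (some buf, merged) => merged ++ [pvFlushB buf]

-- ===== PRECONDITION & SPEC =====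
def Spec_merge_splitted_text (lst : List String) (out : List String) : Prop := out = merge_splitted_text_alt lst
instance (lst : List String) (out : List String) : Decidable (Spec_merge_splitted_text lst out) := by unfold Spec_merge_splitted_text; infer_instance

-- ===== CLAIM (what is proved, stated in full; the proofs are below) =====
def Claim_equal_merge_splitted_text : Prop := ∀ (lst : List String), Dom_merge_splitted_text lst → Spec_merge_splitted_text lst (merge_splitted_text lst)

-- ===== LEMMAS AND PROOFS =====

-- finish B's fold from an arbitrary state
def pvFinB (st : Option (List String) × List String) : List String :=
  match st with
  | (none, merged) => merged
  | (some buf, merged) => merged ++ [pvFlushB buf]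

theorem pvStepB_out (q : Option (List String)) (out : List String) (x : String) :
    pvStepB (q, out) x = ((pvStepB (q, []) x).1, out ++ (pvStepB (q, []) x).2) := by
  cases q <;> simp [pvStepB] <;> split_ifs <;> simp

theorem pvFoldB_out (l : List String) (q : Option (List String)) (out : List String) :
    l.foldl pvStepB (q, out) =
      ((l.foldl pvStepB (q, []) ).1, out ++ (l.foldl pvStepB (q, []) ).2) := by
  induction l generalizing q out with
  | nil => simp
  | cons x t ih =>
    simp only [List.foldl_cons]
    rw [pvStepB_out, ih]
    conv_rhs => rw [pvStepB_out, ih (pvStepB (q, []) x).1]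
    simp

def pvAltGo (l : List String) : List String := pvFinB (l.foldl pvStepB (none, []))
def pvAltReg (buf : List String) (l : List String) : List String :=
  pvFinB (l.foldl pvStepB (some buf, []))

theorem pvAlt_eq (lst : List String) : merge_splitted_text_alt lst = pvAltGo lst := rfl

theorem pvFinB_out (st : Option (List String) × List String) :
    pvFinB st = st.2 ++ pvFinB (st.1, []) := by
  cases st with
  | mk q out => cases q <;> simp [pvFinB]

theorem pvFin_fold (l : List String) (q : Option (List String)) (out : List String) :
    pvFinB (l.foldl pvStepB (q, out)) = out ++ pvFinB (l.foldl pvStepB (q, [])) := by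
  rw [pvFoldB_out, pvFinB_out]
  conv_rhs => rw [pvFinB_out]
  simp

theorem pvAltGo_cons (x : String) (t : List String) :
    pvAltGo (x :: t) =
      if PySem.Str.isIn "(Start)" x || PySem.Str.isIn "(start)" x then pvAltReg [x] t
      else x :: pvAltGo t := by
  simp only [pvAltGo, pvAltReg, List.foldl_cons, pvStepB]
  split_ifs with h
  · rfl
  · rw [pvFin_fold]; rfl

theorem pvAltReg_nil (buf : List String) : pvAltReg buf [] = [pvFlushB buf] := rfl

theorem pvAltReg_cons (buf : List String) (x : String) (t : List String) :
    pvAltReg buf (x :: t) =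
      if x == "(End)" then pvFlushB buf :: pvAltGo t
      else if PySem.Str.isIn "(End)" x || PySem.Str.isIn "(end)" x then
        pvFlushB (buf ++ [x]) :: pvAltGo t
      else pvAltReg (buf ++ [x]) t := by
  simp only [pvAltReg, pvAltGo, List.foldl_cons, pvStepB]
  split_ifs with h1 h2
  · rw [pvFin_fold]; rfl
  · rw [pvFin_fold]; rfl
  · rfl

theorem pvGoA_past (lst : List String) (i : Nat) (h : lst.length ≤ i) : pvGoA lst i = [] := by
  unfold pvGoA; simp [Nat.not_lt.mpr h]

theorem pvScanA_stop (lst : List String) (j : Nat) (h : lst.length ≤ j) :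
    pvScanA lst j = j := by
  unfold pvScanA; simp only [dif_neg (Nat.not_lt.mpr h)]

-- the joint strong induction: A's loop from i equals B's pass over the rest, and inside a region
theorem pvMain (lst : List String) (n : Nat) :
    ∀ i, lst.length - i ≤ n →
      (pvGoA lst i = pvAltGo (lst.drop i)) ∧
      (∀ buf, pvAltReg buf (lst.drop i) =
        pvFlushB (buf ++ (lst.drop i).take (pvEndIdx lst (pvScanA lst i) - i))
          :: pvGoA lst (pvScanA lst i + 1)) := by
  induction n with
  | zero =>
    intro i hi
    have hlen : lst.length ≤ i := by omega
    have hdrop : lst.drop i = [] := List.drop_eq_nil_of_le hlen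
    have hscan : pvScanA lst i = i := pvScanA_stop lst i (by omega)
    constructor
    · rw [pvGoA_past lst i hlen, hdrop]; rfl
    · intro buf
      rw [hdrop, hscan, pvGoA_past lst (i+1) (by omega)]
      simp [pvAltReg_nil]
  | succ n ih =>
    intro i hi
    by_cases hlt : i < lst.length
    · have hdrop : lst.drop i = lst[i] :: lst.drop (i+1) := List.drop_eq_getElem_cons hlt
      have ih1 := ih (i+1) (by omega)
      have hjge : i + 1 ≤ pvScanA lst (i+1) := pvScanA_ge lst (i+1)
      have hseg : ∀ e : Nat, i + 1 ≤ e →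
          (lst.drop i).take (e - i) = [lst[i]] ++ (lst.drop (i+1)).take (e - (i+1)) := by
        intro e he
        rw [hdrop]
        have h2 : e - i = (e - (i+1)) + 1 := by omega
        rw [h2, List.take_succ_cons]
        rfl
      have hege : ∀ j : Nat, j ≤ pvEndIdx lst j := by
        intro j; unfold pvEndIdx; split <;> omega
      constructor
      · -- pvGoA lst i = pvAltGo (drop i)
        rw [hdrop, pvAltGo_cons]
        unfold pvGoA
        rw [dif_pos hlt]
        split_ifs with hs
        · rw [ih1.2 [lst[i]]]
          have hslice : PySem.List.slice lst (some (i : Int))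
              (some ((pvEndIdx lst (pvScanA lst (i+1)) : Nat) : Int)) =
              [lst[i]] ++ (lst.drop (i+1)).take (pvEndIdx lst (pvScanA lst (i+1)) - (i+1)) := by
            rw [PySem.List.slice_natCast]
            exact hseg _ (le_trans hjge (hege _))
          rw [hslice]
          rfl
        · rw [ih1.1]
      · -- region case
        intro buf
        have hstep : pvScanA lst i =
            if (PySem.Str.isIn "(End)" lst[i] || PySem.Str.isIn "(end)" lst[i]) = true
            then i else pvScanA lst (i+1) := by
          by_cases hE : (PySem.Str.isIn "(End)" lst[i] || PySem.Str.isIn "(end)" lst[i]) = true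
          · rw [if_pos hE]
            conv_lhs => unfold pvScanA
            rw [dif_pos hlt, if_pos hE]
          · rw [if_neg hE]
            conv_lhs => unfold pvScanA
            rw [dif_pos hlt, if_neg hE]
        rw [hdrop, pvAltReg_cons, hstep]
        by_cases hE : (PySem.Str.isIn "(End)" lst[i] || PySem.Str.isIn "(end)" lst[i]) = true
        · simp only [hE, if_true]
          by_cases hEq : (lst[i] == "(End)") = true
          · simp only [hEq, if_true]
            have hend : pvEndIdx lst i = i := by
              unfold pvEndIdx
              have hx : lst[i]? = some "(End)" := by
                rw [List.getElem?_eq_getElem hlt, beq_iff_eq.mp hEq]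
              simp [hx]
            rw [hend]
            simp only [Nat.sub_self, List.take_zero, List.append_nil]
            rw [ih1.1]
          · simp only [hEq, Bool.false_eq_true, if_false]
            have hend : pvEndIdx lst i = i + 1 := by
              unfold pvEndIdx
              have h1 : ¬ lst.length ≤ i := by omega
              have h2 : (lst[i]? == some "(End)") = false := by
                rw [List.getElem?_eq_getElem hlt]
                simpa using fun hc => absurd (beq_iff_eq.mpr hc) (by simpa using hEq)
              simp [h1, h2]
            rw [hend]
            have h1 : i + 1 - i = 1 := by omega
            rw [h1, List.take_succ_cons, List.take_zero]
            rw [ih1.1]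
        · have hneqE : (lst[i] == "(End)") = false := by
            cases hx : lst[i] == "(End)"
            · rfl
            · exfalso
              apply hE
              rw [beq_iff_eq.mp hx]
              decide
          simp only [hE, Bool.false_eq_true, if_false, hneqE]
          rw [ih1.2 (buf ++ [lst[i]])]
          have htake : (lst[i] :: lst.drop (i+1)).take (pvEndIdx lst (pvScanA lst (i+1)) - i) =
              [lst[i]] ++ (lst.drop (i+1)).take (pvEndIdx lst (pvScanA lst (i+1)) - (i+1)) := by
            rw [← hdrop]
            exact hseg _ (le_trans hjge (hege _))
          rw [htake, List.append_assoc]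
    · have hlen : lst.length ≤ i := by omega
      have hdrop : lst.drop i = [] := List.drop_eq_nil_of_le hlen
      have hscan : pvScanA lst i = i := pvScanA_stop lst i (by omega)
      constructor
      · rw [pvGoA_past lst i hlen, hdrop]; rfl
      · intro buf
        rw [hdrop, hscan, pvGoA_past lst (i+1) (by omega)]
        simp [pvAltReg_nil]

-- ===== VERDICT (by name: the statement is the Claim_ definition above) =====
theorem merge_splitted_text_spec : Claim_equal_merge_splitted_text := by
  intro lst _
  show merge_splitted_text lst = merge_splitted_text_alt lst
  rw [pvAlt_eq]
  have := (pvMain lst lst.length 0 (by omega)).1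
  simpa using this
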